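-- pv_equiv track=rewrite | github.com/emersonsmall/terminator-analyser | extract_terminators.py | find_related_features
-- ===== SOURCE A (Python) =====
-- import functools
--
-- def parse_attributes(attributes: str) -> dict[str, str]:
--     """
--     Parses a GFF file attribute string into a dictionary.
--     Args:
--         attributes (str): The attribute string from a GFF file.
--     Returns:
--         dict[str, str]: A dictionary mapping attribute names to their values.
--     """
--     assert isinstance(attributes, str), f"Invalid type for parameter 'attributes'"
--
--     attrs = {}
--     for attr in attributes.split(';'):
--         if '=' in attr:
--             key, val = attr.split('=', 1)
--             attrs[key.strip()] = val.strip()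
--     return attrs
--
-- def build_feature_map(gff_lines: list[str]) -> dict[str, list[dict[str, int | str | None]]]:
--     """
--     Creates a dictionary mapping each feature ID to its line index and parent. Handles duplicate feature IDs.
--     Args:
--         gff_lines (list[str]): A list of strings where each string is a line from a gff file.
--     Returns:
--         dict[str, list[dict[str, int | str | None]]]: A dictionary mapping each feature ID to a list of
--         dictionaries, where each dictionary represents a line with said feature ID.
--     """
--     assert isinstance(gff_lines, list), f"Invalid type for parameter 'gff_lines'"
--
--     feature_map = {}
--     for i, line in enumerate(gff_lines):
--         if line.startswith('#') or not line.strip():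
--             continue # skip comments and blank lines
--
--         try:
--             # 9th column contains attribute string
--             attrs = parse_attributes(line.split('\t')[8])
--             f_id = attrs.get("ID")
--
--             if f_id:
--                 f_data = {
--                     "idx": i,
--                     "parent": attrs.get("Parent"),
--                 }
--
--                 if f_id not in feature_map:
--                     feature_map[f_id] = []
--
--                 feature_map[f_id].append(f_data)
--
--         except IndexError:
--             continue # skip lines that do not have an attribute column
--
--     return feature_map
--
-- def find_related_features(gff_lines: list[str], feature_id: str) -> tuple[str, list[int]]:
--     """
--     Searches a GFF file for the given ID and returns the line indices for the feature and any related features.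
--     Args:
--         gff_lines (list[str]): A list of strings where each string is a line from a gff file.
--         start_id (str): The ID of the feature to search for.
--     Returns:
--         tuple[str, list[int]]: The 1st element is the root id of the feature, and the 2nd element is a list containing
--                                the line indices of the lines related to the feature.
--     """
--     assert isinstance(gff_lines, list), f"Invalid type for parameter 'gff_lines'"
--     assert isinstance(feature_id, str), f"Invalid type for parameter 'start_id'"
--
--     feature_map = build_feature_map(gff_lines)
--
--     @functools.lru_cache(maxsize=None)
--     def get_root(f_id: str) -> str:
--         if f_id not in feature_map:
--             return f_id
--
--         parent = feature_map[f_id][0].get("parent")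
--
--         if parent:
--             return get_root(parent)
--
--         return f_id # if no parent found, root ID has been reached
--
--     root_id = get_root(feature_id)
--
--     all_ids = [
--         f_id for f_id in feature_map
--         if get_root(f_id) == root_id
--     ]
--
--     all_idxs = []
--     for f_id in all_ids:
--         for part in feature_map[f_id]:
--             all_idxs.append(part["idx"])
--
--     return root_id, sorted(all_idxs)
-- ===== SOURCE B (Python) =====
-- def parse_attributes(attributes):
--     attrs = {}
--     for attr in attributes.split(';'):
--         if '=' in attr:
--             key, val = attr.split('=', 1)
--             attrs[key.strip()] = val.strip()
--     return attrs
--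
-- def build_feature_map(gff_lines):
--     feature_map = {}
--     for i, line in enumerate(gff_lines):
--         if line.startswith('#') or not line.strip():
--             continue
--         cols = line.split('\t')
--         if len(cols) < 9:
--             continue
--         attrs = parse_attributes(cols[8])
--         f_id = attrs.get("ID")
--         if f_id:
--             feature_map.setdefault(f_id, []).append({"idx": i, "parent": attrs.get("Parent")})
--     return feature_map
--
-- def find_related_features(gff_lines, feature_id):
--     feature_map = build_feature_map(gff_lines)
--
--     def parent_of(f_id):
--         parts = feature_map.get(f_id)
--         if not parts:
--             return None
--         p = parts[0]["parent"]
--         return p if p else None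
--
--     # climb parent pointers to the root
--     root_id = feature_id
--     p = parent_of(root_id)
--     while p is not None:
--         root_id = p
--         p = parent_of(root_id)
--
--     # grow the set of related features downward to a fixpoint
--     related = {root_id}
--     changed = True
--     while changed:
--         changed = False
--         for f_id in feature_map:
--             if f_id not in related:
--                 p = parent_of(f_id)
--                 if p is not None and p in related:
--                     related.add(f_id)
--                     changed = True
--
--     idxs = sorted(part["idx"] for f_id in related if f_id in feature_map
--                   for part in feature_map[f_id])
--     return root_id, idxs
-- ===== Notes on version B (the rewrite author's own statement) =====
-- stated objective: alternative
-- what changed: A resolves the root of every feature by memoized upward recursion (lru_cache get_root per key) and keeps the features whose root matches; B climbs once from feature_id to the root with an iterative loop and then grows the related set downward to a fixpoint (a feature joins when its parent is already in the set), so the per-key recursive root resolution and its function-call/cache overhead disappear.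
import Mathlib
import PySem

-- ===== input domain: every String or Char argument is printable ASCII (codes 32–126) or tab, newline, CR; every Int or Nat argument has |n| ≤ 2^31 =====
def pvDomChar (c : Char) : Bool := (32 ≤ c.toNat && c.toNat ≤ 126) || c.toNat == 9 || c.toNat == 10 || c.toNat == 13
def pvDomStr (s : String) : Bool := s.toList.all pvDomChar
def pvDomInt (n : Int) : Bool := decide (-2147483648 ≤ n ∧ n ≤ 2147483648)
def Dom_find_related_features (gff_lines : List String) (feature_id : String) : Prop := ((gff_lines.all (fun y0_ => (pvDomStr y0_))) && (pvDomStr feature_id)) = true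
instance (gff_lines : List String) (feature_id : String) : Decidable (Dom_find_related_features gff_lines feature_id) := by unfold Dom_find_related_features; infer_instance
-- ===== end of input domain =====

-- B replaces A's memoized per-feature upward root recursion by one iterative climb from
-- feature_id plus a downward fixpoint closure of the related set (objective: alternative).

-- ===== PORT A =====

-- shared preprocessing (both Pythons build the same feature map)
def parseAttributes (attributes : String) : PySem.Dict String String :=
  ((PySem.Str.split? attributes ";").getD []).foldl
    (fun attrs attr =>
      if PySem.Str.isIn "=" attr then
        match (PySem.Str.splitMax? attr "=" 1).getD [] with
        | key :: val :: _ => attrs.insert (PySem.Str.strip key) (PySem.Str.strip val)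
        | _ => attrs   -- unreachable: '=' ∈ attr gives at least two pieces
      else attrs)
    PySem.Dict.empty

-- each feature id maps to its parts; a part {"idx": i, "parent": p} is the pair (i, p)
def buildFeatureMap (gff_lines : List String) : PySem.Dict String (List (Int × Option String)) :=
  (PySem.List.enumerate gff_lines).foldl
    (fun fm p =>
      let i := p.1
      let line := p.2
      if PySem.Str.startswith line "#" || (PySem.Str.strip line == "") then fm
      else
        match PySem.List.pyGet? ((PySem.Str.split? line "\t").getD []) 8 with
        | none => fm   -- IndexError: no attribute column → skip
        | some col =>
          let attrs := parseAttributes col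
          match attrs.get? "ID" with
          | some fid =>
            if fid ≠ "" then
              fm.modify fid [] (fun l => l ++ [(i, attrs.get? "Parent")])
            else fm
          | none => fm)
    PySem.Dict.empty

-- A's recursive get_root (lru_cache only memoizes; the value is the plain recursion).
-- The fuel only makes the recursion structural: under Pre_ (no Parent cycle) the
-- fuel fm.size + 1 is never exhausted.
def getRootA (fm : PySem.Dict String (List (Int × Option String))) : Nat → String → String
  | 0, fid => fid
  | fuel+1, fid =>
    match fm.get? fid with
    | none => fid
    | some parts =>
      match PySem.List.pyGet? parts 0 with
      | none => fid   -- unreachable: every stored parts list is nonempty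
      | some part =>
        match part.2 with
        | some p => if p ≠ "" then getRootA fm fuel p else fid
        | none => fid

def find_related_features (gff_lines : List String) (feature_id : String) : String × List Int :=
  let fm := buildFeatureMap gff_lines
  let root_id := getRootA fm (fm.size + 1) feature_id
  let all_ids := fm.keys.filter (fun fid => getRootA fm (fm.size + 1) fid == root_id)
  let all_idxs := all_ids.foldl
    (fun acc fid => (fm.getD fid []).foldl (fun acc2 part => acc2 ++ [part.1]) acc) []
  (root_id, PySem.List.sorted all_idxs (fun x => x) false)

-- ===== PORT B =====

-- B's parent_of helper
def parentOf (fm : PySem.Dict String (List (Int × Option String))) (fid : String) : Option String :=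
  match fm.get? fid with
  | none => none
  | some parts =>
    match PySem.List.pyGet? parts 0 with
    | none => none   -- 'if not parts' guard
    | some part =>
      match part.2 with
      | some p => if p = "" then none else some p
      | none => none

-- B's iterative while-loop climb to the root (fuel fm.size + 1 is a totality guard only)
def climbB (fm : PySem.Dict String (List (Int × Option String))) : Nat → String → String
  | 0, fid => fid
  | fuel+1, fid =>
    match parentOf fm fid with
    | some p => climbB fm fuel p
    | none => fid

-- one pass of B's 'for f_id in feature_map' body; the Bool is the 'changed' flag
def roundB (fm : PySem.Dict String (List (Int × Option String))) (s : PySem.Set String) :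
    PySem.Set String × Bool :=
  fm.keys.foldl
    (fun st fid =>
      if PySem.Set.contains st.1 fid then st
      else
        match parentOf fm fid with
        | some p => if PySem.Set.contains st.1 p then (PySem.Set.add st.1 fid, true) else st
        | none => st)
    (s, false)

-- B's 'while changed' loop (fuel fm.size + 1: each productive round grows the set)
def loopB (fm : PySem.Dict String (List (Int × Option String))) : Nat → PySem.Set String → PySem.Set String
  | 0, s => s
  | fuel+1, s =>
    let r := roundB fm s
    if r.2 then loopB fm fuel r.1 else r.1

def find_related_features_alt (gff_lines : List String) (feature_id : String) : String × List Int :=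
  let fm := buildFeatureMap gff_lines
  let root_id := climbB fm (fm.size + 1) feature_id
  let related := loopB fm (fm.size + 1) (PySem.Set.ofList [root_id])
  let idxs := related.flatMap
    (fun fid =>
      match fm.get? fid with
      | some parts => parts.map Prod.fst
      | none => [])
  (root_id, PySem.List.sorted idxs (fun x => x) false)

-- ===== PRECONDITION & SPEC =====

-- the node after exactly j Parent steps (none: the chain ended earlier)
def pvIterParent (fm : PySem.Dict String (List (Int × Option String))) : Nat → String → Option String
  | 0, fid => some fid
  | j+1, fid =>
    match parentOf fm fid with
    | some p => pvIterParent fm j p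
    | none => none

-- Pre_ excludes exactly the inputs whose Parent pointers form a cycle (some feature is its
-- own proper ancestor): there A's recursive get_root never terminates and Python raises
-- RecursionError.  Acyclicity of a finite pointer graph is stated through pvIterParent,
-- the j-fold Parent step — a shape condition on the input's Parent column; neither port
-- computes pvIterParent.
def Pre_find_related_features (gff_lines : List String) (feature_id : String) : Prop :=
  ∀ k ∈ (buildFeatureMap gff_lines).keys, ∀ j < (buildFeatureMap gff_lines).size + 2,
    1 ≤ j → pvIterParent (buildFeatureMap gff_lines) j k ≠ some k

instance (gff_lines : List String) (feature_id : String) : Decidable (Pre_find_related_features gff_lines feature_id) := by unfold Pre_find_related_features; infer_instance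

def pvWitness_find_related_features : List String × String :=
  (["\t\t\t\t\t\t\t\tID=g1", "\t\t\t\t\t\t\t\tID=m1;Parent=g1"], "m1")

def Spec_find_related_features (gff_lines : List String) (feature_id : String) (out : String × List Int) : Prop := out = find_related_features_alt gff_lines feature_id
instance (gff_lines : List String) (feature_id : String) (out : String × List Int) : Decidable (Spec_find_related_features gff_lines feature_id out) := by unfold Spec_find_related_features; infer_instance

-- ===== CLAIM (what is proved, stated in full; the proofs are below) =====
def Claim_equal_find_related_features : Prop := ∀ (gff_lines : List String) (feature_id : String), Dom_find_related_features gff_lines feature_id → Pre_find_related_features gff_lines feature_id → Spec_find_related_features gff_lines feature_id (find_related_features gff_lines feature_id)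

-- ===== LEMMAS AND PROOFS =====

-- abbreviation used only by the proofs
def FMapT : Type := PySem.Dict String (List (Int × Option String))

def preNoCycle (fm : FMapT) : Prop :=
  ∀ k ∈ fm.keys, ∀ j < fm.size + 2, 1 ≤ j → pvIterParent fm j k ≠ some k

-- climbing facts -------------------------------------------------------------
theorem climbB_terminal (fm : FMapT) (n : Nat) (fid : String)
    (h : parentOf fm fid = none) : climbB fm n fid = fid := by
  cases n with
  | zero => rfl
  | succ n => simp [climbB, h]

theorem climbB_comp (fm : FMapT) (m n : Nat) (k : String) :
    climbB fm (m + n) k = climbB fm n (climbB fm m k) := by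
  induction m generalizing k with
  | zero => rw [Nat.zero_add]; rfl
  | succ m ih =>
    have he : m + 1 + n = (m + n) + 1 := by omega
    rw [he]
    cases h : parentOf fm k with
    | none => simp [climbB, h, climbB_terminal _ _ _ h]
    | some p => simp [climbB, h, ih]

theorem pvIter_comp (fm : FMapT) (a t : Nat) (k : String) :
    pvIterParent fm (a + t) k = (pvIterParent fm a k).bind (pvIterParent fm t) := by
  induction a generalizing k with
  | zero => rw [Nat.zero_add]; rfl
  | succ a ih =>
    have he : a + 1 + t = (a + t) + 1 := by omega
    rw [he]
    cases h : parentOf fm k with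
    | none => simp [pvIterParent, h]
    | some p => simp [pvIterParent, h, ih]

theorem pvIter_of_not_terminal (fm : FMapT) (n : Nat) (k : String)
    (h : parentOf fm (climbB fm n k) ≠ none) :
    pvIterParent fm n k = some (climbB fm n k) := by
  induction n generalizing k with
  | zero => rfl
  | succ n ih =>
    cases hp : parentOf fm k with
    | none => rw [climbB_terminal _ _ _ hp] at h; exact absurd hp h
    | some p =>
      have hc : climbB fm (n+1) k = climbB fm n p := by simp [climbB, hp]
      rw [hc] at h ⊢
      simpa [pvIterParent, hp] using ih p h

theorem mem_keys_of_parentOf (fm : FMapT) (fid : String)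
    (h : parentOf fm fid ≠ none) : fid ∈ fm.keys := by
  by_contra hmem
  have hg : fm.get? fid = none := (PySem.Dict.get?_eq_none_iff_not_mem_keys fm fid).2 hmem
  simp [parentOf, hg] at h

theorem getRootA_eq_climbB (fm : FMapT) (n : Nat) (fid : String) :
    getRootA fm n fid = climbB fm n fid := by
  induction n generalizing fid with
  | zero => rfl
  | succ n ih =>
    cases hg : fm.get? fid with
    | none => simp [getRootA, climbB, parentOf, hg]
    | some parts =>
      cases hp : PySem.List.pyGet? parts 0 with
      | none => simp [getRootA, climbB, parentOf, hg, hp]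
      | some part =>
        obtain ⟨i, po⟩ := part
        cases po with
        | none => simp [getRootA, climbB, parentOf, hg, hp]
        | some p =>
          by_cases hpe : p = ""
          · simp [getRootA, climbB, parentOf, hg, hp, hpe]
          · simp [getRootA, climbB, parentOf, hg, hp, hpe, ih]

theorem keys_length_eq_size (fm : FMapT) : fm.keys.length = fm.size := by
  simp [PySem.Dict.keys, PySem.Dict.size]

-- pigeonhole on parent chains ------------------------------------------------
theorem chain_repeat (fm : FMapT) (k : String) (m : Nat)
    (hmem : ∀ i < m, ∃ x, pvIterParent fm i k = some x ∧ x ∈ fm.keys)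
    (hm : fm.size < m) :
    ∃ a b, a < b ∧ b < m ∧ pvIterParent fm a k = pvIterParent fm b k := by
  classical
  have hcard : (fm.keys.toFinset).card < (Finset.range m).card := by
    have h1 : fm.keys.toFinset.card ≤ fm.keys.length := List.toFinset_card_le _
    have h2 := keys_length_eq_size fm
    rw [Finset.card_range]
    omega
  have hmaps : Set.MapsTo (fun i => (pvIterParent fm i k).getD "")
      ↑(Finset.range m) ↑(fm.keys.toFinset) := by
    intro i hi
    simp only [Finset.coe_range, Set.mem_Iio] at hi
    obtain ⟨x, hx1, hx2⟩ := hmem i hi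
    simp [hx1, List.mem_toFinset, hx2]
  obtain ⟨a, ha, b, hb, hne, hfe⟩ := Finset.exists_ne_map_eq_of_card_lt_of_maps_to hcard hmaps
  simp only [Finset.mem_range] at ha hb
  obtain ⟨xa, hxa, _⟩ := hmem a ha
  obtain ⟨xb, hxb, _⟩ := hmem b hb
  have hab : pvIterParent fm a k = pvIterParent fm b k := by
    rw [hxa, hxb]
    rw [hxa, hxb] at hfe
    simpa using hfe
  rcases Nat.lt_or_ge a b with hlt | hge
  · exact ⟨a, b, hlt, hb, hab⟩
  · have hlt : b < a := by omega
    exact ⟨b, a, hlt, ha, hab.symm⟩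

theorem climb_terminates (fm : FMapT) (hpre : preNoCycle fm) (k : String) :
    parentOf fm (climbB fm (fm.size + 1) k) = none := by
  by_contra h
  have hnt : ∀ i, i ≤ fm.size + 1 → parentOf fm (climbB fm i k) ≠ none := by
    intro i hi hterm
    have hc : climbB fm (fm.size + 1) k = climbB fm i k := by
      have he : fm.size + 1 = i + (fm.size + 1 - i) := by omega
      rw [he, climbB_comp, climbB_terminal _ _ _ hterm]
    rw [hc] at h
    exact h hterm
  have hmem : ∀ i < fm.size + 2, ∃ x, pvIterParent fm i k = some x ∧ x ∈ fm.keys := by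
    intro i hi
    exact ⟨climbB fm i k, pvIter_of_not_terminal _ _ _ (hnt i (by omega)),
      mem_keys_of_parentOf _ _ (hnt i (by omega))⟩
  obtain ⟨a, b, hab, hbm, heq⟩ := chain_repeat fm k (fm.size + 2) hmem (by omega)
  obtain ⟨x, hxa, hxk⟩ := hmem a (by omega)
  have hxb : pvIterParent fm b k = some x := by rw [← heq]; exact hxa
  have hcyc : pvIterParent fm (b - a) x = some x := by
    have he : b = a + (b - a) := by omega
    rw [he, pvIter_comp, hxa] at hxb
    simpa using hxb
  exact hpre x hxk (b - a) (by omega) (by omega) hcyc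

theorem minchain_aux (fm : FMapT) (B : Nat) : ∀ (j : Nat), j ≤ B → ∀ (k r : String),
    pvIterParent fm j k = some r → ∃ j' ≤ fm.size, pvIterParent fm j' k = some r := by
  induction B with
  | zero =>
    intro j hj k r h
    have hj0 : j = 0 := by omega
    subst hj0
    exact ⟨0, Nat.zero_le _, h⟩
  | succ B ihB =>
    intro j hj k r h
    by_cases hjs : j ≤ fm.size
    · exact ⟨j, hjs, h⟩
    · have hmem : ∀ i < j, ∃ x, pvIterParent fm i k = some x ∧ x ∈ fm.keys := by
        intro i hi
        have he : j = i + (j - i) := by omega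
        rw [he, pvIter_comp] at h
        cases hx : pvIterParent fm i k with
        | none => rw [hx] at h; simp at h
        | some x =>
          rw [hx] at h
          simp only [Option.bind_some] at h
          refine ⟨x, rfl, ?_⟩
          have h1 : 1 ≤ j - i := by omega
          cases hji : j - i with
          | zero => omega
          | succ t =>
            rw [hji] at h
            cases hp : parentOf fm x with
            | none => simp [pvIterParent, hp] at h
            | some p => exact mem_keys_of_parentOf _ _ (by simp [hp])
      obtain ⟨a, b, hab, hbm, heq⟩ := chain_repeat fm k j hmem (by omega)
      have h' : pvIterParent fm (a + (j - b)) k = some r := by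
        have hjb : j = b + (j - b) := by omega
        rw [pvIter_comp, heq, ← pvIter_comp, ← hjb]
        exact h
      exact ihB (a + (j - b)) (by omega) k r h'

theorem minchain (fm : FMapT) (j : Nat) (k r : String)
    (h : pvIterParent fm j k = some r) :
    ∃ j' ≤ fm.size, pvIterParent fm j' k = some r :=
  minchain_aux fm j j (Nat.le_refl j) k r h

theorem climb_of_iter (fm : FMapT) (j : Nat) : ∀ (n : Nat) (k r : String),
    pvIterParent fm j k = some r → parentOf fm r = none → j ≤ n →
    climbB fm n k = r := by
  induction j with
  | zero =>
    intro n k r h hr _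
    have hk : k = r := by simpa [pvIterParent] using h
    subst hk
    exact climbB_terminal _ _ _ hr
  | succ j ih =>
    intro n k r h hr hn
    cases hp : parentOf fm k with
    | none => simp [pvIterParent, hp] at h
    | some p =>
      have h' : pvIterParent fm j p = some r := by simpa [pvIterParent, hp] using h
      cases n with
      | zero => omega
      | succ m =>
        have hc : climbB fm (m+1) k = climbB fm m p := by simp [climbB, hp]
        rw [hc]
        exact ih m p r h' hr (by omega)

theorem iter_of_climb (fm : FMapT) (n : Nat) (k : String) :
    ∃ j ≤ n, pvIterParent fm j k = some (climbB fm n k) := by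
  induction n generalizing k with
  | zero => exact ⟨0, Nat.le_refl 0, rfl⟩
  | succ n ih =>
    cases hp : parentOf fm k with
    | none =>
      refine ⟨0, by omega, ?_⟩
      rw [climbB_terminal _ _ _ hp]
      rfl
    | some p =>
      obtain ⟨j, hj, hit⟩ := ih p
      have hc : climbB fm (n+1) k = climbB fm n p := by simp [climbB, hp]
      exact ⟨j+1, by omega, by rw [hc]; simpa [pvIterParent, hp] using hit⟩

theorem climb_char (fm : FMapT) (k r : String) (hr : parentOf fm r = none) :
    climbB fm (fm.size + 1) k = r ↔ ∃ j, pvIterParent fm j k = some r := by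
  constructor
  · intro h
    obtain ⟨j, _, hit⟩ := iter_of_climb fm (fm.size + 1) k
    rw [h] at hit
    exact ⟨j, hit⟩
  · rintro ⟨j, hj⟩
    obtain ⟨j', hle, hit⟩ := minchain fm j k r hj
    exact climb_of_iter fm j' (fm.size + 1) k r hit hr (by omega)

-- the round fold -------------------------------------------------------------
def gStep (fm : FMapT) (st : PySem.Set String × Bool) (fid : String) :
    PySem.Set String × Bool :=
  if PySem.Set.contains st.1 fid then st
  else
    match parentOf fm fid with
    | some p => if PySem.Set.contains st.1 p then (PySem.Set.add st.1 fid, true) else st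
    | none => st

theorem roundB_eq_fold (fm : FMapT) (s : PySem.Set String) :
    roundB fm s = fm.keys.foldl (gStep fm) (s, false) := rfl

theorem gStep_fate (fm : FMapT) (s : PySem.Set String) (c : Bool) (fid : String) :
    gStep fm (s, c) fid = (s, c) ∨
      (fid ∉ s ∧ (∃ p, parentOf fm fid = some p ∧ p ∈ s) ∧
        gStep fm (s, c) fid = (s ++ [fid], true)) := by
  by_cases hc : fid ∈ s
  · left; simp [gStep, hc]
  · cases hp : parentOf fm fid with
    | none => left; simp [gStep, hc, hp]
    | some p =>
      by_cases hps : p ∈ s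
      · right
        exact ⟨hc, ⟨p, rfl, hps⟩, by simp [gStep, PySem.Set.add, hc, hp, hps]⟩
      · left; simp [gStep, hc, hp, hps]

theorem gfold_prefix (fm : FMapT) (l : List String) (st : PySem.Set String × Bool) :
    st.1 <+: (l.foldl (gStep fm) st).1 := by
  induction l generalizing st with
  | nil => exact List.prefix_refl _
  | cons fid t ih =>
    rw [List.foldl_cons]
    refine List.IsPrefix.trans ?_ (ih (gStep fm st fid))
    obtain ⟨s, c⟩ := st
    rcases gStep_fate fm s c fid with h | ⟨_, _, h⟩
    · rw [h]
    · rw [h]; exact ⟨[fid], rfl⟩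

theorem gfold_flag_mono (fm : FMapT) (l : List String) (st : PySem.Set String × Bool)
    (h : st.2 = true) : (l.foldl (gStep fm) st).2 = true := by
  induction l generalizing st with
  | nil => exact h
  | cons fid t ih =>
    rw [List.foldl_cons]
    apply ih
    obtain ⟨s, c⟩ := st
    rcases gStep_fate fm s c fid with hf | ⟨_, _, hf⟩
    · rw [hf]; exact h
    · rw [hf]

theorem gfold_unchanged (fm : FMapT) (l : List String) (s : PySem.Set String)
    (h : (l.foldl (gStep fm) (s, false)).2 = false) :
    (l.foldl (gStep fm) (s, false)).1 = s := by
  induction l with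
  | nil => rfl
  | cons fid t ih =>
    rw [List.foldl_cons] at h ⊢
    rcases gStep_fate fm s false fid with hf | ⟨_, _, hf⟩
    · rw [hf] at h ⊢; exact ih h
    · rw [hf] at h
      have hm := gfold_flag_mono fm t (s ++ [fid], true) rfl
      rw [h] at hm
      exact absurd hm (by decide)

theorem gfold_growth (fm : FMapT) (l : List String) (s : PySem.Set String)
    (h : (l.foldl (gStep fm) (s, false)).2 = true) :
    s.length < (l.foldl (gStep fm) (s, false)).1.length := by
  induction l with
  | nil => simp at h
  | cons fid t ih =>
    rw [List.foldl_cons] at h ⊢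
    rcases gStep_fate fm s false fid with hf | ⟨_, _, hf⟩
    · rw [hf] at h ⊢; exact ih h
    · rw [hf]
      have hp := (gfold_prefix fm t (s ++ [fid], true)).length_le
      simp only [List.length_append, List.length_cons, List.length_nil] at hp
      omega

theorem gfold_nodup (fm : FMapT) (l : List String) (st : PySem.Set String × Bool)
    (h : st.1.Nodup) : (l.foldl (gStep fm) st).1.Nodup := by
  induction l generalizing st with
  | nil => exact h
  | cons fid t ih =>
    rw [List.foldl_cons]
    apply ih
    obtain ⟨s, c⟩ := st
    rcases gStep_fate fm s c fid with hf | ⟨hns, _, hf⟩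
    · rw [hf]; exact h
    · rw [hf]
      refine List.Nodup.append h (List.nodup_singleton fid) ?_
      intro a ha hamem
      rw [List.mem_singleton] at hamem
      subst hamem
      exact hns ha

theorem gfold_subset (fm : FMapT) (l : List String) (st : PySem.Set String × Bool)
    (x : String) (hx : x ∈ (l.foldl (gStep fm) st).1) : x ∈ st.1 ∨ x ∈ l := by
  induction l generalizing st with
  | nil => exact Or.inl hx
  | cons fid t ih =>
    rw [List.foldl_cons] at hx
    rcases ih (gStep fm st fid) hx with h1 | h2
    · obtain ⟨s, c⟩ := st
      rcases gStep_fate fm s c fid with hf | ⟨_, _, hf⟩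
      · rw [hf] at h1; exact Or.inl h1
      · rw [hf] at h1
        rcases List.mem_append.1 h1 with hm | hm
        · exact Or.inl hm
        · simp at hm; subst hm; exact Or.inr List.mem_cons_self
    · exact Or.inr (List.mem_cons_of_mem _ h2)

theorem gfold_sound (fm : FMapT) (R : String → Prop)
    (hcl : ∀ fid p, parentOf fm fid = some p → R p → R fid)
    (l : List String) (st : PySem.Set String × Bool) (hst : ∀ x ∈ st.1, R x) :
    ∀ x ∈ (l.foldl (gStep fm) st).1, R x := by
  induction l generalizing st with
  | nil => exact hst
  | cons fid t ih =>
    intro x hx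
    rw [List.foldl_cons] at hx
    refine ih (gStep fm st fid) ?_ x hx
    obtain ⟨s, c⟩ := st
    intro y hy
    rcases gStep_fate fm s c fid with hf | ⟨_, ⟨p, hp, hps⟩, hf⟩
    · rw [hf] at hy; exact hst y hy
    · rw [hf] at hy
      rcases List.mem_append.1 hy with hm | hm
      · exact hst y hm
      · simp at hm; subst hm
        exact hcl y p hp (hst p hps)

theorem gfold_closed (fm : FMapT) (l : List String) (s : PySem.Set String) :
    (l.foldl (gStep fm) (s, false)).2 = false →
    ∀ fid ∈ l, ∀ p, parentOf fm fid = some p → p ∈ s → fid ∈ s := by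
  induction l with
  | nil => intro _ fid hfid; cases hfid
  | cons fid0 t ih =>
    intro h fid hfid p hp hps
    rw [List.foldl_cons] at h
    rcases gStep_fate fm s false fid0 with hf | ⟨_, _, hf⟩
    · rw [hf] at h
      rcases List.mem_cons.1 hfid with he | hm
      · subst he
        by_contra hcontra
        have hstep : gStep fm (s, false) fid = (s ++ [fid], true) := by
          simp [gStep, PySem.Set.add, hcontra, hp, hps]
        rw [hstep] at hf
        have hft : true = false := congrArg Prod.snd hf
        exact absurd hft (by decide)
      · exact ih h fid hm p hp hps
    · rw [hf] at h
      have hm := gfold_flag_mono fm t (s ++ [fid0], true) rfl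
      rw [h] at hm
      exact absurd hm (by decide)

theorem gfold_saturated (fm : FMapT) (l : List String) (s : PySem.Set String)
    (hall : ∀ fid ∈ l, fid ∈ s) : l.foldl (gStep fm) (s, false) = (s, false) := by
  induction l with
  | nil => rfl
  | cons fid t ih =>
    rw [List.foldl_cons]
    have hstep : gStep fm (s, false) fid = (s, false) := by
      simp [gStep, hall fid List.mem_cons_self]
    rw [hstep]
    exact ih (fun x hx => hall x (List.mem_cons_of_mem _ hx))

-- the fixpoint loop ----------------------------------------------------------
theorem loopB_succ (fm : FMapT) (fuel : Nat) (s : PySem.Set String) :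
    loopB fm (fuel + 1) s =
      if (roundB fm s).2 then loopB fm fuel (roundB fm s).1 else (roundB fm s).1 := rfl

theorem loopB_prefix (fm : FMapT) (fuel : Nat) (s : PySem.Set String) :
    s <+: loopB fm fuel s := by
  induction fuel generalizing s with
  | zero => exact List.prefix_refl _
  | succ fuel ih =>
    rw [loopB_succ]
    have hpre : s <+: (roundB fm s).1 := by
      rw [roundB_eq_fold]; exact gfold_prefix fm fm.keys (s, false)
    by_cases hc : (roundB fm s).2 = true
    · rw [if_pos hc]; exact hpre.trans (ih _)
    · rw [if_neg hc]; exact hpre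

theorem loopB_nodup (fm : FMapT) (fuel : Nat) (s : PySem.Set String)
    (h : s.Nodup) : (loopB fm fuel s).Nodup := by
  induction fuel generalizing s with
  | zero => exact h
  | succ fuel ih =>
    rw [loopB_succ]
    have hr : (roundB fm s).1.Nodup := by
      rw [roundB_eq_fold]; exact gfold_nodup fm fm.keys (s, false) h
    by_cases hc : (roundB fm s).2 = true
    · rw [if_pos hc]; exact ih _ hr
    · rw [if_neg hc]; exact hr

theorem loopB_sound (fm : FMapT) (R : String → Prop)
    (hcl : ∀ fid p, parentOf fm fid = some p → R p → R fid)
    (fuel : Nat) (s : PySem.Set String) (hs : ∀ x ∈ s, R x) :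
    ∀ x ∈ loopB fm fuel s, R x := by
  induction fuel generalizing s with
  | zero => exact hs
  | succ fuel ih =>
    intro x hx
    rw [loopB_succ] at hx
    have hr : ∀ y ∈ (roundB fm s).1, R y := by
      rw [roundB_eq_fold]; exact gfold_sound fm R hcl fm.keys (s, false) hs
    by_cases hc : (roundB fm s).2 = true
    · rw [if_pos hc] at hx; exact ih _ hr x hx
    · rw [if_neg hc] at hx; exact hr x hx

theorem loopB_fix (fm : FMapT) (T : List String)
    (hkeys : ∀ k ∈ fm.keys, k ∈ T) (fuel : Nat) (s : PySem.Set String)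
    (hnd : s.Nodup) (hsub : ∀ x ∈ s, x ∈ T)
    (hfuel : (PySem.Set.ofList T).length ≤ s.length + fuel) :
    (roundB fm (loopB fm fuel s)).2 = false := by
  induction fuel generalizing s with
  | zero =>
    have hsub' : s ⊆ PySem.Set.ofList T := fun x hx => (PySem.Set.mem_ofList T x).2 (hsub x hx)
    have hsp : s.Subperm (PySem.Set.ofList T) := hnd.subperm hsub'
    have hlen : (PySem.Set.ofList T).length ≤ s.length := by simpa using hfuel
    have hperm : s.Perm (PySem.Set.ofList T) := hsp.perm_of_length_le hlen
    have hallmem : ∀ k ∈ fm.keys, k ∈ s := fun k hk =>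
      hperm.mem_iff.2 ((PySem.Set.mem_ofList T k).2 (hkeys k hk))
    show (roundB fm s).2 = false
    rw [roundB_eq_fold, gfold_saturated fm fm.keys s hallmem]
  | succ fuel ih =>
    rw [loopB_succ]
    by_cases hc : (roundB fm s).2 = true
    · rw [if_pos hc]
      apply ih
      · rw [roundB_eq_fold]; exact gfold_nodup _ _ _ hnd
      · intro x hx
        rw [roundB_eq_fold] at hx
        rcases gfold_subset fm fm.keys (s, false) x hx with h1 | h2
        · exact hsub x h1
        · exact hkeys x h2
      · have hg : s.length < (roundB fm s).1.length := by
          rw [roundB_eq_fold]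
          apply gfold_growth
          rw [← roundB_eq_fold]
          exact hc
        omega
    · rw [if_neg hc]
      have hun : (roundB fm s).1 = s := by
        rw [roundB_eq_fold]
        apply gfold_unchanged
        rw [← roundB_eq_fold]
        cases hcc : (roundB fm s).2
        · rfl
        · exact absurd hcc hc
      rw [hun]
      cases hcc : (roundB fm s).2
      · rfl
      · exact absurd hcc hc

-- membership in the fixpoint set ----------------------------------------------
theorem ofList_singleton (r : String) : PySem.Set.ofList [r] = [r] := rfl

theorem loop_mem_iff (fm : FMapT) (r x : String) :
    x ∈ loopB fm (fm.size + 1) (PySem.Set.ofList [r]) ↔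
      ∃ j, pvIterParent fm j x = some r := by
  constructor
  · intro hx
    refine loopB_sound fm (fun y => ∃ j, pvIterParent fm j y = some r) ?_ _ _ ?_ x hx
    · rintro fid p hp ⟨j, hj⟩
      exact ⟨j + 1, by simp [pvIterParent, hp, hj]⟩
    · intro y hy
      rw [ofList_singleton] at hy
      simp at hy
      subst hy
      exact ⟨0, rfl⟩
  · rintro ⟨j, hj⟩
    have hfl : (roundB fm (loopB fm (fm.size + 1) (PySem.Set.ofList [r]))).2 = false := by
      apply loopB_fix fm (r :: fm.keys) (fun k hk => List.mem_cons_of_mem _ hk)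
      · rw [ofList_singleton]; exact List.nodup_singleton r
      · intro y hy; rw [ofList_singleton] at hy; simp at hy; subst hy
        exact List.mem_cons_self
      · have h1 : (PySem.Set.ofList (r :: fm.keys)).length ≤ (r :: fm.keys).length :=
          ((PySem.Set.nodup_ofList _).subperm
            (fun x hx => (PySem.Set.mem_ofList _ x).1 hx)).length_le
        have h2 := keys_length_eq_size fm
        rw [ofList_singleton]
        simp only [List.length_cons, List.length_singleton] at h1 ⊢
        omega
    have hclosed : ∀ fid ∈ fm.keys, ∀ p, parentOf fm fid = some p →
        p ∈ loopB fm (fm.size + 1) (PySem.Set.ofList [r]) →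
        fid ∈ loopB fm (fm.size + 1) (PySem.Set.ofList [r]) := by
      rw [roundB_eq_fold] at hfl
      exact gfold_closed fm fm.keys _ hfl
    have hrin : r ∈ loopB fm (fm.size + 1) (PySem.Set.ofList [r]) := by
      have hp := loopB_prefix fm (fm.size + 1) (PySem.Set.ofList [r])
      rw [ofList_singleton] at hp
      exact hp.subset (by simp)
    have haux : ∀ (j : Nat) (y : String), pvIterParent fm j y = some r →
        y ∈ loopB fm (fm.size + 1) (PySem.Set.ofList [r]) := by
      intro j
      induction j with
      | zero =>
        intro y hy
        have hx : y = r := by simpa [pvIterParent] using hy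
        subst hx
        exact hrin
      | succ j ih =>
        intro y hy
        cases hp : parentOf fm y with
        | none => simp [pvIterParent, hp] at hy
        | some p =>
          have hy' : pvIterParent fm j p = some r := by simpa [pvIterParent, hp] using hy
          exact hclosed y (mem_keys_of_parentOf fm y (by simp [hp])) p hp (ih p hy')
    exact haux j x hj

-- feature-map key facts --------------------------------------------------------
def bStep (fm : FMapT) (p : Int × String) : FMapT :=
  let i := p.1
  let line := p.2
  if PySem.Str.startswith line "#" || (PySem.Str.strip line == "") then fm
  else
    match PySem.List.pyGet? ((PySem.Str.split? line "\t").getD []) 8 with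
    | none => fm
    | some col =>
      let attrs := parseAttributes col
      match attrs.get? "ID" with
      | some fid =>
        if fid ≠ "" then
          fm.modify fid [] (fun l => l ++ [(i, attrs.get? "Parent")])
        else fm
      | none => fm

theorem build_eq_fold (gff_lines : List String) :
    buildFeatureMap gff_lines = (PySem.List.enumerate gff_lines).foldl bStep PySem.Dict.empty := rfl

theorem bStep_keys_nodup (fm : FMapT) (p : Int × String) (h : fm.keys.Nodup) :
    (bStep fm p).keys.Nodup := by
  simp only [bStep]
  split
  · exact h
  · split
    · exact h
    · split
      · split
        · rw [PySem.Dict.keys_modify]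
          exact PySem.Dict.nodup_keys_insert _ _ _ h
        · exact h
      · exact h

theorem build_keys_nodup (gff_lines : List String) :
    (buildFeatureMap gff_lines).keys.Nodup := by
  rw [build_eq_fold]
  have aux : ∀ (l : List (Int × String)) (fm : FMapT), fm.keys.Nodup →
      ((l.foldl bStep fm)).keys.Nodup := by
    intro l
    induction l with
    | nil => intro fm h; exact h
    | cons p t ih =>
      intro fm h
      rw [List.foldl_cons]
      exact ih _ (bStep_keys_nodup fm p h)
  apply aux
  simp [PySem.Dict.keys_empty]

-- list plumbing ----------------------------------------------------------------
theorem flatMap_filter_of_empty {α β : Type} (p : α → Bool) (g : α → List β)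
    (hg : ∀ x, p x = false → g x = []) (l : List α) :
    l.flatMap g = (l.filter p).flatMap g := by
  induction l with
  | nil => rfl
  | cons x t ih =>
    cases hp : p x with
    | false => simp [List.flatMap_cons, List.filter_cons, hp, hg x hp, ih]
    | true => simp [List.flatMap_cons, List.filter_cons, hp, ih]

-- the main equivalence ----------------------------------------------------------
theorem main_eq (gff_lines : List String) (feature_id : String)
    (hpre : preNoCycle (buildFeatureMap gff_lines)) :
    find_related_features gff_lines feature_id = find_related_features_alt gff_lines feature_id := by
  have hkeysnd : (buildFeatureMap gff_lines).keys.Nodup := build_keys_nodup gff_lines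
  set fm : FMapT := buildFeatureMap gff_lines with hfmdef
  have hAdef : find_related_features gff_lines feature_id =
      (getRootA fm (fm.size + 1) feature_id,
        PySem.List.sorted
          ((fm.keys.filter (fun f => getRootA fm (fm.size + 1) f == getRootA fm (fm.size + 1) feature_id)).foldl
            (fun acc f => (fm.getD f []).foldl (fun acc2 part => acc2 ++ [part.1]) acc) [])
          (fun x => x) false) := rfl
  have hBdef : find_related_features_alt gff_lines feature_id =
      (climbB fm (fm.size + 1) feature_id,
        PySem.List.sorted
          ((loopB fm (fm.size + 1) (PySem.Set.ofList [climbB fm (fm.size + 1) feature_id])).flatMap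
            (fun f => match fm.get? f with
              | some parts => parts.map (fun part => part.1)
              | none => []))
          (fun x => x) false) := rfl
  rw [hAdef, hBdef]
  have hroot : ∀ f, getRootA fm (fm.size + 1) f = climbB fm (fm.size + 1) f :=
    fun f => getRootA_eq_climbB fm (fm.size + 1) f
  have hterm : parentOf fm (climbB fm (fm.size + 1) feature_id) = none :=
    climb_terminates fm hpre feature_id
  set root : String := climbB fm (fm.size + 1) feature_id with hrootdef
  set F : PySem.Set String := loopB fm (fm.size + 1) (PySem.Set.ofList [root]) with hFdef
  refine Prod.ext (hroot feature_id) ?_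
  -- second components
  have hA2 : (fm.keys.filter (fun f => getRootA fm (fm.size + 1) f == root)).foldl
      (fun acc f => (fm.getD f []).foldl (fun acc2 part => acc2 ++ [part.1]) acc) []
      = (fm.keys.filter (fun f => getRootA fm (fm.size + 1) f == root)).flatMap
          (fun f => (fm.getD f []).map (fun part => part.1)) := by
    rw [PySem.List.foldl_congr_mem _ _
      (fun acc f => acc ++ (fm.getD f []).map (fun part => part.1)) []
      (fun acc x _ => PySem.List.foldl_append_singleton_eq_map (fun part => part.1) (fm.getD x []) acc)]
    rw [PySem.List.foldl_append_eq_flatMap]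
    rfl
  rw [hroot feature_id]
  rw [hA2]
  -- B side: restrict to keys
  have hBfil : F.flatMap (fun f => match fm.get? f with
      | some parts => parts.map (fun part => part.1)
      | none => [])
      = (F.filter (fun f => fm.contains f)).flatMap (fun f => match fm.get? f with
      | some parts => parts.map (fun part => part.1)
      | none => []) := by
    apply flatMap_filter_of_empty
    intro x hx
    have hnk : x ∉ fm.keys := fun hm => by
      rw [(PySem.Dict.contains_iff_mem_keys fm x).2 hm] at hx
      exact absurd hx (by decide)
    rw [(PySem.Dict.get?_eq_none_iff_not_mem_keys fm x).2 hnk]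
  rw [hBfil]
  have hgcongr : ∀ f ∈ F.filter (fun f => fm.contains f),
      (fun f => match fm.get? f with
        | some parts => parts.map (fun part => part.1)
        | none => []) f
      = (fun f => (fm.getD f []).map (fun part => part.1)) f := by
    intro f hf
    have hcont : fm.contains f = true := (List.mem_filter.1 hf).2
    cases hq : fm.get? f with
    | none =>
      rw [PySem.Dict.get?_eq_none_iff_not_mem_keys] at hq
      exact absurd ((PySem.Dict.contains_iff_mem_keys fm f).1 hcont) hq
    | some parts =>
      simp only
      rw [hq, PySem.Dict.getD_of_get?_eq_some _ _ hq]
  rw [List.flatMap_congr hgcongr]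
  -- permutation of the id lists
  have hFnodup : F.Nodup := by
    rw [hFdef]
    apply loopB_nodup
    rw [ofList_singleton]
    exact List.nodup_singleton root
  have hmemiff : ∀ x, x ∈ fm.keys.filter (fun f => climbB fm (fm.size + 1) f == root)
      ↔ x ∈ F.filter (fun f => fm.contains f) := by
    intro x
    rw [List.mem_filter, List.mem_filter]
    constructor
    · rintro ⟨hk, hb⟩
      have hceq : climbB fm (fm.size + 1) x = root := by simpa using hb
      refine ⟨?_, (PySem.Dict.contains_iff_mem_keys fm x).2 hk⟩
      rw [hFdef]
      exact (loop_mem_iff fm root x).2 ((climb_char fm x root hterm).1 hceq)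
    · rintro ⟨hFm, hc⟩
      have hk : x ∈ fm.keys := (PySem.Dict.contains_iff_mem_keys fm x).1 hc
      refine ⟨hk, ?_⟩
      rw [hFdef] at hFm
      have hit := (loop_mem_iff fm root x).1 hFm
      have hceq : climbB fm (fm.size + 1) x = root := (climb_char fm x root hterm).2 hit
      simpa using hceq
  have hperm : (fm.keys.filter (fun f => climbB fm (fm.size + 1) f == root)).Perm
      (F.filter (fun f => fm.contains f)) :=
    (List.perm_ext_iff_of_nodup (hkeysnd.filter _) (hFnodup.filter _)).2 hmemiff
  have hpermA : (fm.keys.filter (fun f => getRootA fm (fm.size + 1) f == root)).Perm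
      (F.filter (fun f => fm.contains f)) := by
    have he : (fm.keys.filter (fun f => getRootA fm (fm.size + 1) f == root))
        = fm.keys.filter (fun f => climbB fm (fm.size + 1) f == root) := by
      apply List.filter_congr
      intro f _
      rw [hroot f]
    rw [he]
    exact hperm
  exact (PySem.List.sorted_id_eq_sorted_id_iff_perm _ _).2
    (hpermA.flatMap (fun a _ => List.Perm.refl _))



theorem pvWitness_ok : Dom_find_related_features pvWitness_find_related_features.1 pvWitness_find_related_features.2 ∧ Pre_find_related_features pvWitness_find_related_features.1 pvWitness_find_related_features.2 := by
  constructor <;> decide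

-- ===== VERDICT (by name: the statement is the Claim_ definition above) =====
theorem find_related_features_spec : Claim_equal_find_related_features := by
  intro gff_lines feature_id _ hpre
  exact main_eq gff_lines feature_id hpre
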